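-- pv_equiv track=rewrite | github.com/hyperkishore/captains-log | src/captains_log/summarizers/focus_calculator.py | _count_context_switches
-- ===== SOURCE A (Python) =====
-- def _count_context_switches(activity_data: list[dict]) -> int:
--     """Count context switches (app changes)."""
--     if len(activity_data) < 2:
--         return 0
--
--     switches = 0
--     prev_bundle = activity_data[0].get("bundle_id")
--
--     for event in activity_data[1:]:
--         curr_bundle = event.get("bundle_id")
--         if curr_bundle and curr_bundle != prev_bundle:
--             switches += 1
--             prev_bundle = curr_bundle
--
--     return switches
-- ===== SOURCE B (Python) =====
-- def _count_context_switches(activity_data: list[dict]) -> int: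
--     """Count context switches (app changes)."""
--     if len(activity_data) < 2:
--         return 0
--     # Sequence: first event's raw bundle_id (even if falsy), then only
--     # truthy bundle_ids of the remaining events; switches = adjacent differing pairs.
--     seq = [activity_data[0].get("bundle_id")]
--     seq += [b for e in activity_data[1:] for b in [e.get("bundle_id")] if b]
--     return sum(1 for a, b in zip(seq, seq[1:]) if a != b)
-- ===== Notes on version B (the rewrite author's own statement) =====
-- stated objective: idiomatic
-- what changed: Replaces the stateful prev-tracking scan with a build-then-count decomposition: construct the filtered bundle sequence (first raw bundle, then truthy later bundles) and count adjacent differing pairs with zip.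
import Mathlib
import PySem

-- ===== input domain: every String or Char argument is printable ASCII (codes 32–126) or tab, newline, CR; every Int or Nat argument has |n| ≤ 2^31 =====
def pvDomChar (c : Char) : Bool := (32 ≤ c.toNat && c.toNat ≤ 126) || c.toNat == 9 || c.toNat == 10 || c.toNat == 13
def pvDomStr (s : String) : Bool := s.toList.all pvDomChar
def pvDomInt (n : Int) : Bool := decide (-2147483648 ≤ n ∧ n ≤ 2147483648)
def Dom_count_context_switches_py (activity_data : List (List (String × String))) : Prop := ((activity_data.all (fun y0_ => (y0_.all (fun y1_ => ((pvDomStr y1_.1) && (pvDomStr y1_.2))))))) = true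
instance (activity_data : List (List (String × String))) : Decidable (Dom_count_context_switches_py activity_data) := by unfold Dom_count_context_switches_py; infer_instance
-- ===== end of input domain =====

-- B changes decomposition only: it builds the filtered bundle sequence and counts
-- adjacent differing pairs, instead of A's stateful prev-tracking scan (idiomatic, same cost).

-- shared primitive: event.get("bundle_id") on the association-list dict (first match)
def pvGetBundle (e : List (String × String)) : Option String :=
  (e.find? (fun kv => kv.1 == "bundle_id")).map (·.2)

-- Python truthiness of the optional string: None and "" are falsy
def pvTruthy (o : Option String) : Bool :=
  match o with
  | some s => !(s == "")
  | none => false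

-- ===== PORT A =====
def count_context_switches_py (activity_data : List (List (String × String))) : Int :=
  if activity_data.length < 2 then 0
  else
    match activity_data with
    | [] => 0
    | e0 :: rest =>
      (rest.foldl
        (fun (st : Int × Option String) ev =>
          let curr := pvGetBundle ev
          if pvTruthy curr && curr != st.2 then (st.1 + 1, curr) else st)
        (0, pvGetBundle e0)).1

-- ===== PORT B =====
def count_context_switches_py_alt (activity_data : List (List (String × String))) : Int :=
  if activity_data.length < 2 then 0
  else
    match activity_data with
    | [] => 0
    | e0 :: rest =>
      let seq : List (Option String) :=
        pvGetBundle e0 ::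
          rest.filterMap (fun e =>
            let b := pvGetBundle e
            if pvTruthy b then some b else none)
      ((seq.zip seq.tail).countP (fun p => p.1 != p.2) : Int)

-- ===== PRECONDITION & SPEC =====
def Spec_count_context_switches_py (activity_data : List (List (String × String))) (out : Int) : Prop := out = count_context_switches_py_alt activity_data
instance (activity_data : List (List (String × String))) (out : Int) : Decidable (Spec_count_context_switches_py activity_data out) := by unfold Spec_count_context_switches_py; infer_instance

-- ===== CLAIM (what is proved, stated in full; the proofs are below) =====
def Claim_equal_count_context_switches_py : Prop := ∀ (activity_data : List (List (String × String))), Dom_count_context_switches_py activity_data → Spec_count_context_switches_py activity_data (count_context_switches_py activity_data)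

-- ===== LEMMAS AND PROOFS =====

def pvAdj (l : List (Option String)) : Nat :=
  (l.zip l.tail).countP (fun p => p.1 != p.2)

def pvFilt (rest : List (List (String × String))) : List (Option String) :=
  rest.filterMap (fun e =>
    let b := pvGetBundle e
    if pvTruthy b then some b else none)

theorem pvAdj_cons (a b : Option String) (l : List (Option String)) :
    pvAdj (a :: b :: l) = (if a ≠ b then 1 else 0) + pvAdj (b :: l) := by
  by_cases h : a = b <;> simp [pvAdj, h] <;> omega

theorem pv_loop_eq (rest : List (List (String × String))) :
    ∀ (s : Int) (prev : Option String),
    (rest.foldl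
        (fun (st : Int × Option String) ev =>
          let curr := pvGetBundle ev
          if pvTruthy curr && curr != st.2 then (st.1 + 1, curr) else st)
        (s, prev)).1 = s + (pvAdj (prev :: pvFilt rest) : Int) := by
  induction rest with
  | nil => intro s prev; simp [pvAdj, pvFilt]
  | cons e rest ih =>
    intro s prev
    by_cases ht : pvTruthy (pvGetBundle e)
    · have hf : pvFilt (e :: rest) = pvGetBundle e :: pvFilt rest := by
        simp [pvFilt, ht]
      by_cases hne : pvGetBundle e = prev
      · have hstep : (let curr := pvGetBundle e
            if pvTruthy curr && curr != (s, prev).2 then ((s, prev).1 + 1, curr) else (s, prev))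
            = ((s, prev) : Int × Option String) := by simp [hne]
        rw [List.foldl_cons, hstep, ih s prev, hf, hne, pvAdj_cons,
          if_neg (by simp)]
        simp
      · have hstep : (let curr := pvGetBundle e
            if pvTruthy curr && curr != (s, prev).2 then ((s, prev).1 + 1, curr) else (s, prev))
            = ((s + 1, pvGetBundle e) : Int × Option String) := by simp [ht, hne]
        rw [List.foldl_cons, hstep, ih (s + 1) (pvGetBundle e), hf, pvAdj_cons,
          if_pos (fun h => hne h.symm)]
        push_cast; ring
    · have hf : pvFilt (e :: rest) = pvFilt rest := by simp [pvFilt, ht]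
      have hstep : (let curr := pvGetBundle e
            if pvTruthy curr && curr != (s, prev).2 then ((s, prev).1 + 1, curr) else (s, prev))
            = ((s, prev) : Int × Option String) := by simp [ht]
      rw [List.foldl_cons, hstep, ih s prev, hf]

-- ===== VERDICT (by name: the statement is the Claim_ definition above) =====
theorem count_context_switches_py_spec : Claim_equal_count_context_switches_py := by
  intro ad _
  unfold Spec_count_context_switches_py count_context_switches_py count_context_switches_py_alt
  match ad with
  | [] => simp
  | [e] => simp
  | e0 :: e1 :: rest =>
    simp only [List.length_cons]
    rw [if_neg (by omega), if_neg (by omega)]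
    rw [pv_loop_eq (e1 :: rest) 0 (pvGetBundle e0)]
    simp [pvAdj, pvFilt]
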